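-- pv_equiv track=rewrite | github.com/codeafix/mdlint-obsidian | mdlint_obsidian/rules/math.py | _scan_inline_math
-- ===== SOURCE A (Python) =====
-- def _scan_inline_math(line: str) -> bool | None:
--     """Return True if the line has an unclosed inline math expression.
--
--     Returns None (no error) if the unclosed $ looks like a currency symbol
--     (i.e., followed immediately by a digit or space).
--     """
--     in_math = False
--     math_opener_pos = -1
--     math_opener_next_char = ""
--     i = 0
--     n = len(line)
--
--     while i < n:
--         c = line[i]
--
--         # Skip escaped characters
--         if c == "\\":
--             i += 2
--             continue
--
--         # Skip $$ (block math marker embedded in a line)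
--         if line[i : i + 2] == "$$":
--             i += 2
--             continue
--
--         if c == "$":
--             next_char = line[i + 1] if i + 1 < n else ""
--             if not in_math:
--                 in_math = True
--                 math_opener_pos = i
--                 math_opener_next_char = next_char
--             else:
--                 in_math = False
--             i += 1
--             continue
--
--         i += 1
--
--     if not in_math:
--         return None
--
--     # Conservative: only flag if the opening $ is followed by a non-whitespace,
--     # non-digit character (reduces currency false positives).
--     if math_opener_next_char == "" or math_opener_next_char.isspace():
--         return None
--     if math_opener_next_char.isdigit():
--         return None
--
--     return True
-- ===== SOURCE B (Python) =====
-- def _scan_inline_math(line: str) -> bool | None: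
--     """Return True if the line has an unclosed inline math expression.
--
--     Pair-consuming strategy: repeatedly locate the next active single '$'
--     (skipping escaped pairs and '$$' markers) and its matching close; if an
--     opener has no close, it is the unclosed one and its following character
--     decides (None for currency-looking '$', True otherwise).
--     """
--     n = len(line)
--
--     def find_dollar(i: int) -> int | None:
--         """Index of the next active single '$' at or after i, else None."""
--         while i < n:
--             c = line[i]
--             if c == "\\":
--                 i += 2
--             elif line[i : i + 2] == "$$":
--                 i += 2
--             elif c == "$":
--                 return i
--             else:
--                 i += 1
--         return None
--
--     i = 0
--     while True:
--         opener = find_dollar(i)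
--         if opener is None:
--             return None
--         closer = find_dollar(opener + 1)
--         if closer is None:
--             nxt = line[opener + 1] if opener + 1 < n else ""
--             if nxt == "" or nxt.isspace() or nxt.isdigit():
--                 return None
--             return True
--         i = closer + 1
-- ===== Notes on version B (the rewrite author's own statement) =====
-- stated objective: alternative
-- what changed: Replaces A's single toggle-flag scan that remembers the latest opener by a pair-consuming search: a find_dollar helper locates the next active single '$', the outer loop repeatedly consumes (opener, closer) pairs, and an opener without a closer is directly the unclosed one.
import Mathlib
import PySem

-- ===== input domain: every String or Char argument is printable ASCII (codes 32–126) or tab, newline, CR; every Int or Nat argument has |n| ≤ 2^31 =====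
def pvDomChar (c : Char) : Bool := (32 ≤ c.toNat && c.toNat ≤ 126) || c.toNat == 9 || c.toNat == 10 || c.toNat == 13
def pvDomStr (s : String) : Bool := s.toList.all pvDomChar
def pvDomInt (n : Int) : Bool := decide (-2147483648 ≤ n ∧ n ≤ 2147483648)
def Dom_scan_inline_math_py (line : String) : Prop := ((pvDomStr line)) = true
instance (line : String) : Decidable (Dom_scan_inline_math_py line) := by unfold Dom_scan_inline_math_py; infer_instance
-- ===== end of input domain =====

-- B replaces A's toggle-flag scan (remembering the latest opener) by a
-- pair-consuming search: find the next active '$' and its matching close,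
-- repeat; an opener without a close is the unclosed one (objective:
-- alternative decomposition, same cost).

-- ===== PORT A =====
-- line[i+1] if i + 1 < n else ""  (shared shape of "next char as string")
def pvNextStrAt (cs : List Char) (o : Nat) : String :=
  match cs[o+1]? with
  | some c => String.ofList [c]
  | none => ""

-- A's while loop: index i, state (in_math, math_opener_next_char); '\' advances
-- two, '$$' advances two, a single '$' toggles in_math recording its next char.
def pvLoopA (cs : List Char) (i : Nat) (m : Bool) (nc : String) : Bool × String :=
  if h : i < cs.length then
    if cs[i] = '\\' then pvLoopA cs (i+2) m nc
    else if cs[i] = '$' ∧ cs[i+1]? = some '$' then pvLoopA cs (i+2) m nc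
    else if cs[i] = '$' then
      if m then pvLoopA cs (i+1) false nc
      else pvLoopA cs (i+1) true (pvNextStrAt cs i)
    else pvLoopA cs (i+1) m nc
  else (m, nc)
termination_by cs.length - i

def scan_inline_math_py (line : String) : Option Bool :=
  let r := pvLoopA line.toList 0 false ""
  if r.1 = false then none
  else if r.2 = "" then none
  else if PySem.Str.strIsspace r.2 then none
  else if PySem.Str.strIsdigit r.2 then none
  else some true

-- ===== PORT B =====
-- B's find_dollar helper: index of the next active single '$' at/after i.
def pvFind (cs : List Char) (i : Nat) : Option Nat :=
  if h : i < cs.length then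
    if cs[i] = '\\' then pvFind cs (i+2)
    else if cs[i] = '$' ∧ cs[i+1]? = some '$' then pvFind cs (i+2)
    else if cs[i] = '$' then some i
    else pvFind cs (i+1)
  else none
termination_by cs.length - i

-- B's outer while-True loop: consume (opener, closer) pairs; an opener with no
-- closer is the unclosed one, judged by its next character.  (fuel only makes
-- the loop total in Lean; cs.length + 1 iterations always suffice since each
-- pair advances the index by at least 2)
def pvPairs (cs : List Char) : Nat → Nat → Option Bool
  | 0, _ => none
  | fuel+1, i =>
    match pvFind cs i with
    | none => none
    | some o =>
      match pvFind cs (o+1) with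
      | none =>
        if pvNextStrAt cs o = "" ∨ PySem.Str.strIsspace (pvNextStrAt cs o) ∨ PySem.Str.strIsdigit (pvNextStrAt cs o) then none
        else some true
      | some c => pvPairs cs fuel (c+1)

def scan_inline_math_py_alt (line : String) : Option Bool :=
  pvPairs line.toList (line.toList.length + 1) 0

-- ===== PRECONDITION & SPEC =====
def Spec_scan_inline_math_py (line : String) (out : Option Bool) : Prop := out = scan_inline_math_py_alt line
instance (line : String) (out : Option Bool) : Decidable (Spec_scan_inline_math_py line out) := by unfold Spec_scan_inline_math_py; infer_instance

-- ===== CLAIM (what is proved, stated in full; the proofs are below) =====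
def Claim_equal_scan_inline_math_py : Prop := ∀ (line : String), Dom_scan_inline_math_py line → Spec_scan_inline_math_py line (scan_inline_math_py line)

-- ===== LEMMAS AND PROOFS =====

-- pvFind only returns in-range indices at/after its argument (used for
-- termination of the pair-consuming loop below).
theorem pvFind_bounds (cs : List Char) : ∀ (n i o : Nat), cs.length - i ≤ n →
    pvFind cs i = some o → i ≤ o ∧ o < cs.length := by
  intro n
  induction n with
  | zero =>
      intro i o hi h
      rw [pvFind, dif_neg (by omega)] at h
      exact absurd h (by simp)
  | succ n ih =>
      intro i o hi h
      rw [pvFind] at h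
      by_cases hlt : i < cs.length
      · rw [dif_pos hlt] at h
        split_ifs at h with h2 h3 h4
        · have := ih (i+2) o (by omega) h; omega
        · have := ih (i+2) o (by omega) h; omega
        · simp only [Option.some.injEq] at h; omega
        · have := ih (i+1) o (by omega) h; omega
      · rw [dif_neg hlt] at h
        exact absurd h (by simp)


/-- Post-processing of A's final state. -/
def pvFinA (r : Bool × String) : Option Bool :=
  if r.1 = false then none
  else if r.2 = "" then none
  else if PySem.Str.strIsspace r.2 then none
  else if PySem.Str.strIsdigit r.2 then none
  else some true

/-- A's loop factors through pvFind: it jumps from one active '$' to the next. -/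
theorem loopA_find (cs : List Char) : ∀ (n i : Nat), cs.length - i ≤ n → ∀ (m : Bool) (nc : String),
    pvLoopA cs i m nc =
      match pvFind cs i with
      | none => (m, nc)
      | some o =>
        if m then pvLoopA cs (o+1) false nc
        else pvLoopA cs (o+1) true (pvNextStrAt cs o) := by
  intro n
  induction n with
  | zero =>
      intro i hi m nc
      rw [pvLoopA, pvFind, dif_neg (by omega), dif_neg (by omega)]
  | succ n ih =>
      intro i hi m nc
      rw [pvLoopA, pvFind]
      by_cases hlt : i < cs.length
      · rw [dif_pos hlt, dif_pos hlt]
        by_cases h2 : cs[i] = '\\'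
        · rw [if_pos h2, if_pos h2]; exact ih (i+2) (by omega) m nc
        · rw [if_neg h2, if_neg h2]
          by_cases h3 : cs[i] = '$' ∧ cs[i+1]? = some '$'
          · rw [if_pos h3, if_pos h3]; exact ih (i+2) (by omega) m nc
          · rw [if_neg h3, if_neg h3]
            by_cases h4 : cs[i] = '$'
            · rw [if_pos h4, if_pos h4]
            · rw [if_neg h4, if_neg h4]; exact ih (i+1) (by omega) m nc
      · rw [dif_neg hlt, dif_neg hlt]

/-- Main agreement: starting out of math mode, A's scan finalised equals B's
pair-consuming loop from the same index, for sufficient fuel. -/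
theorem scan_agree (cs : List Char) : ∀ (n i : Nat), cs.length - i < n →
    ∀ (nc : String), pvFinA (pvLoopA cs i false nc) = pvPairs cs n i := by
  intro n
  induction n with
  | zero => intro i hi; omega
  | succ n ih =>
      intro i hi nc
      rw [loopA_find cs cs.length i (by omega), pvPairs]
      cases h : pvFind cs i with
      | none => simp [pvFinA]
      | some o =>
        simp only [Bool.false_eq_true, if_false]
        have hb1 := pvFind_bounds cs cs.length i o (by omega) h
        rw [loopA_find cs cs.length (o+1) (by omega)]
        cases h2 : pvFind cs (o+1) with
        | none =>
            simp only [pvFinA]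
            split_ifs <;> simp_all
        | some c =>
            show pvFinA (pvLoopA cs (c+1) false (pvNextStrAt cs o)) = pvPairs cs n (c+1)
            have hb2 := pvFind_bounds cs cs.length (o+1) c (by omega) h2
            exact ih (c+1) (by omega) (pvNextStrAt cs o)

-- ===== VERDICT (by name: the statement is the Claim_ definition above) =====
theorem scan_inline_math_py_spec : Claim_equal_scan_inline_math_py := by
  intro line _
  show scan_inline_math_py line = scan_inline_math_py_alt line
  have h := scan_agree line.toList (line.toList.length + 1) 0 (by omega) ""
  simpa [scan_inline_math_py, scan_inline_math_py_alt, pvFinA] using h
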